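-- pv_equiv track=rewrite | github.com/HirstGroup/cdk_scripts | macrolides/murcko.py | get_smiles_index
-- ===== SOURCE A (Python) =====
-- def get_smiles_index(smiles_list):
--     """
--     Get index of unique smiles
--     Used e.g. to get index of a Murcko scaffold
--     """
--
--     smiles_dict = dict()
--
--     index_list = []
--
--     for smi in smiles_list:
--         if smi not in smiles_dict:
--             smiles_dict[smi] = len(smiles_dict)
--         index_list.append(smiles_dict[smi])
--
--     return index_list
-- ===== SOURCE B (Python) =====
-- def get_smiles_index(smiles_list):
--     """
--     Get index of unique smiles
--     Used e.g. to get index of a Murcko scaffold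
--     """
--     # closed form: the index of smi is the number of distinct strings
--     # strictly before its first occurrence
--     return [len(set(smiles_list[:smiles_list.index(smi)])) for smi in smiles_list]
-- ===== Notes on version B (the rewrite author's own statement) =====
-- stated objective: alternative
-- what changed: Replaces A's stateful single pass (incrementally grown counter dict) by a stateless per-element closed form: each element's index is computed independently as the number of distinct strings strictly before its first occurrence (len(set(prefix before list.index(smi)))).
import Mathlib
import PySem

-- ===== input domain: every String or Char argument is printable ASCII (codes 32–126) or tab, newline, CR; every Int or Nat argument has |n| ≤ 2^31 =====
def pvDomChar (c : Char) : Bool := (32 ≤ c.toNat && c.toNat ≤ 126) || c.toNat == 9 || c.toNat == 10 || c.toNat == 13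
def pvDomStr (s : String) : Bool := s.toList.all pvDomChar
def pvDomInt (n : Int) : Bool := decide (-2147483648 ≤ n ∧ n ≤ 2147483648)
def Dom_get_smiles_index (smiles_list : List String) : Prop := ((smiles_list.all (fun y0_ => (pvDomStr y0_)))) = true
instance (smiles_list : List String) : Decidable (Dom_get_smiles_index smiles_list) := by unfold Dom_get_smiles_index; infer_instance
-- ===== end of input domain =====

-- B replaces A's stateful counter-dict pass by a stateless per-element closed form
-- (index of s = number of distinct strings strictly before s's first occurrence); same results.

-- ===== PORT A =====
-- the loop: for smi in smiles_list: if smi not in d: d[smi] = len(d); out.append(d[smi])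
def pvALoop : List String → PySem.Dict String Int → List Int
  | [], _ => []
  | smi :: rest, d =>
    let d' := if d.contains smi then d else d.insert smi (d.size : Int)
    -- d[smi] cannot raise here (just inserted if missing), so getD is exact
    (d'.getD smi 0) :: pvALoop rest d'

def get_smiles_index (smiles_list : List String) : List Int :=
  pvALoop smiles_list PySem.Dict.empty

-- ===== PORT B =====
-- [len(set(smiles_list[:smiles_list.index(smi)])) for smi in smiles_list]
def get_smiles_index_alt (smiles_list : List String) : List Int :=
  smiles_list.map (fun smi =>
    -- smiles_list.index(smi) cannot raise (smi is drawn from smiles_list), so getD is exact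
    ((PySem.Set.len (PySem.Set.ofList
        (PySem.List.slice smiles_list none
          (some (((PySem.List.index? smiles_list smi).getD 0 : Nat) : Int))))) : Int))

-- ===== PRECONDITION & SPEC =====
def Spec_get_smiles_index (smiles_list : List String) (out : List Int) : Prop := out = get_smiles_index_alt smiles_list
instance (smiles_list : List String) (out : List Int) : Decidable (Spec_get_smiles_index smiles_list out) := by unfold Spec_get_smiles_index; infer_instance

-- ===== CLAIM (what is proved, stated in full; the proofs are below) =====
def Claim_equal_get_smiles_index : Prop := ∀ (smiles_list : List String), Dom_get_smiles_index smiles_list → Spec_get_smiles_index smiles_list (get_smiles_index smiles_list)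

-- ===== LEMMAS AND PROOFS =====

theorem pvSnocNodup (w : List String) (t : String) : (w ++ [t]).Nodup ↔ t ∉ w ∧ w.Nodup := by
  simpa using List.nodup_middle (l₁ := w) (a := t) (l₂ := [])

theorem pvAddMem (u : List String) (s : String) (h : s ∈ u) : PySem.Set.add u s = u := by
  simp [PySem.Set.add, PySem.Set.contains, h]

theorem pvAddNotMem (u : List String) (s : String) (h : s ∉ u) : PySem.Set.add u s = u ++ [s] := by
  simp [PySem.Set.add, PySem.Set.contains, h]

-- the dict A builds from a (nodup) list of first occurrences u: each s ∈ u mapped to its position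
def pvEnum (u : List String) : PySem.Dict String Int :=
  u.foldl (fun d s => d.insert s (d.size : Int)) PySem.Dict.empty

theorem pvEnum_append (u : List String) (s : String) :
    pvEnum (u ++ [s]) = (pvEnum u).insert s ((pvEnum u).size : Int) := by
  simp [pvEnum, List.foldl_append]

theorem pvEnum_keys (u : List String) : (pvEnum u).keys = PySem.Set.ofList u := by
  simpa [pvEnum] using PySem.Dict.keys_foldl_insert u (fun d s => (d.size : Int)) PySem.Dict.empty

theorem pvEnum_contains (u : List String) (s : String) :
    (pvEnum u).contains s = decide (s ∈ u) := by
  rw [PySem.Dict.contains_eq_decide_mem_keys, pvEnum_keys]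
  simp [PySem.Set.mem_ofList]

theorem pvEnum_size (u : List String) (hu : u.Nodup) : (pvEnum u).size = u.length := by
  induction u using List.reverseRecOn with
  | nil => simp [pvEnum]
  | append_singleton w t ih =>
    obtain ⟨ht, hw⟩ := (pvSnocNodup w t).mp hu
    rw [pvEnum_append, PySem.Dict.size_insert]
    simp [pvEnum_contains, ht, ih hw]

theorem pvEnum_getD (u : List String) (hu : u.Nodup) (s : String) (hs : s ∈ u) :
    (pvEnum u).getD s 0 = (((PySem.List.index? u s).getD 0 : Nat) : Int) := by
  induction u using List.reverseRecOn with
  | nil => simp at hs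
  | append_singleton w t ih =>
    obtain ⟨ht, hw⟩ := (pvSnocNodup w t).mp hu
    rw [pvEnum_append]
    by_cases hst : s = t
    · subst hst
      rw [PySem.Dict.getD_insert_self, PySem.List.index?_append_singleton_self w s ht,
        pvEnum_size w hw]
      simp
    · have hsw : s ∈ w := by
        rcases List.mem_append.mp hs with h | h
        · exact h
        · simp at h; exact absurd h hst
      rw [PySem.Dict.getD_insert_of_ne _ _ _ hst, ih hw hsw,
        PySem.List.index?_append_of_mem [t] hsw]

-- Set.update u l extends u on the right
theorem pvUpdate_prefix (l u : List String) : ∃ t, PySem.Set.update u l = u ++ t := by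
  induction l generalizing u with
  | nil => exact ⟨[], by simp [PySem.Set.update]⟩
  | cons s rest ih =>
    have hstep : PySem.Set.update u (s :: rest) = PySem.Set.update (PySem.Set.add u s) rest := rfl
    by_cases h : s ∈ u
    · obtain ⟨t, ht⟩ := ih u
      exact ⟨t, by rw [hstep, pvAddMem u s h]; exact ht⟩
    · obtain ⟨t, ht⟩ := ih (u ++ [s])
      exact ⟨[s] ++ t, by rw [hstep, pvAddNotMem u s h, ht]; simp⟩

theorem pvIndex_update (l u : List String) (s : String) (hs : s ∈ u) :
    PySem.List.index? (PySem.Set.update u l) s = PySem.List.index? u s := by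
  obtain ⟨t, ht⟩ := pvUpdate_prefix l u
  rw [ht, PySem.List.index?_append_of_mem t hs]

-- invariant for A's loop: started at pvEnum u it emits positions in Set.update u l
theorem pvMain (l u : List String) (hu : u.Nodup) :
    pvALoop l (pvEnum u) =
      l.map (fun s => (((PySem.List.index? (PySem.Set.update u l) s).getD 0 : Nat) : Int)) := by
  induction l generalizing u with
  | nil => simp [pvALoop]
  | cons s rest ih =>
    have hupd : PySem.Set.update u (s :: rest) = PySem.Set.update (PySem.Set.add u s) rest := rfl
    by_cases h : s ∈ u
    · have hc : (pvEnum u).contains s = true := by simp [pvEnum_contains, h]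
      have hadd : PySem.Set.add u s = u := pvAddMem u s h
      rw [List.map_cons, hupd, hadd]
      simp only [pvALoop, hc, if_true]
      rw [pvEnum_getD u hu s h, pvIndex_update rest u s h, ih u hu]
    · have hc : (pvEnum u).contains s = false := by simp [pvEnum_contains, h]
      have hadd : PySem.Set.add u s = u ++ [s] := pvAddNotMem u s h
      have hu' : (u ++ [s]).Nodup := (pvSnocNodup u s).mpr ⟨h, hu⟩
      rw [List.map_cons, hupd, hadd]
      simp only [pvALoop, hc, if_false, Bool.false_eq_true]
      rw [← pvEnum_append, ih (u ++ [s]) hu',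
        pvEnum_getD (u ++ [s]) hu' s (by simp),
        pvIndex_update rest (u ++ [s]) s (by simp)]

-- B's closed form: position in Set.update u l = |u| part consumed already, i.e. for s ∉ u it is
-- the size of the set after absorbing the prefix of l before s's first occurrence
theorem pvClosed (l : List String) (u : List String) (s : String) (hsu : s ∉ u) (hs : s ∈ l) :
    PySem.List.index? (PySem.Set.update u l) s =
      some (PySem.Set.update u (l.take ((PySem.List.index? l s).getD 0))).length := by
  induction l generalizing u with
  | nil => simp at hs
  | cons a rest ih =>
    have hstep : PySem.Set.update u (a :: rest) = PySem.Set.update (PySem.Set.add u a) rest := rfl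
    by_cases has : a = s
    · subst has
      rw [PySem.List.index?_cons_self]
      simp only [Option.getD_some, List.take_zero]
      have hu' : PySem.Set.add u a = u ++ [a] := pvAddNotMem u a hsu
      rw [hstep, hu', pvIndex_update rest (u ++ [a]) a (by simp),
        PySem.List.index?_append_singleton_self u a hsu]
      simp [PySem.Set.update]
    · have hsrest : s ∈ rest := by
        rcases List.mem_cons.mp hs with heq | h
        · exact absurd heq.symm has
        · exact h
      rw [PySem.List.index?_cons_of_ne _ has]
      have hk : ∃ k, PySem.List.index? rest s = some k := by
        cases hk : PySem.List.index? rest s with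
        | none => rw [PySem.List.index?_eq_none_iff] at hk; exact absurd hsrest hk
        | some k => exact ⟨k, rfl⟩
      obtain ⟨k, hk⟩ := hk
      have hsu' : s ∉ PySem.Set.add u a := by
        by_cases h : a ∈ u
        · rw [pvAddMem u a h]; exact hsu
        · rw [pvAddNotMem u a h]
          simp only [List.mem_append, List.mem_singleton]
          rintro (h1 | h2)
          · exact hsu h1
          · exact has h2.symm
      rw [hstep, ih (PySem.Set.add u a) hsu' hsrest, hk]
      simp only [Option.map_some, Option.getD_some]
      rfl

-- ===== VERDICT (by name: the statement is the Claim_ definition above) =====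
theorem get_smiles_index_spec : Claim_equal_get_smiles_index := by
  intro l _
  show get_smiles_index l = get_smiles_index_alt l
  have h0 : pvEnum [] = PySem.Dict.empty := rfl
  have hA := pvMain l [] List.nodup_nil
  rw [h0] at hA
  rw [get_smiles_index, hA, get_smiles_index_alt]
  apply List.map_congr_left
  intro s hs
  have hcl := pvClosed l [] s (by simp) hs
  have hupd0 : PySem.Set.update ([] : List String) l = PySem.Set.ofList l := rfl
  have htake : PySem.Set.update ([] : List String) (l.take ((PySem.List.index? l s).getD 0)) =
      PySem.Set.ofList (l.take ((PySem.List.index? l s).getD 0)) := rfl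
  rw [htake] at hcl
  rw [hcl]
  simp [PySem.Set.len, PySem.List.slice_to_natCast]
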